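-- pv_equiv track=rewrite | github.com/Zhang-Wen-chao/Computer-Systems | LeetCode/pbdodo/20240616/2.py | min_cost_to_eat_burgers
-- ===== SOURCE A (Python) =====
-- def min_cost_to_eat_burgers(t, test_cases):
--     results = []
--
--     for case in test_cases:
--         n = case[0]
--         prices = case[1]
--
--         # 初始化dp数组，大小为n+1，初始值为无穷大
--         dp = [float('inf')] * (n + 1)
--         dp[0] = 0
--         points = [0] * (n + 1)
--
--         for i in range(1, n + 1):
--             price = prices[i - 1]
--
--             # 第一种情况：直接购买汉堡
--             dp[i] = dp[i - 1] + price
--             points[i] = points[i - 1] + price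
--
--             # 第二种情况：如果汉堡币足够，可以用免单券
--             if points[i - 1] >= 100:
--                 for j in range(i - 1, -1, -1):
--                     if points[j] >= 100:
--                         dp[i] = min(dp[i], dp[j] + price)
--                         points[i] = points[j] + price - 100
--                         break
--
--         results.append(dp[n])
--
--     return results
-- ===== SOURCE B (Python) =====
-- def min_cost_to_eat_burgers(t, test_cases):
--     # A's coupon branch always breaks at j = i-1 and min(dp[i], dp[i-1]+price)
--     # equals dp[i-1]+price, so dp[n] is just the sum of the first n prices.
--     results = []
--     for n, prices in test_cases:
--         total = 0
--         for i in range(1, n + 1):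
--             total += prices[i - 1]
--         results.append(total)
--     return results
-- ===== Notes on version B (the rewrite author's own statement) =====
-- stated objective: simpler
-- what changed: Dropped the dp/points arrays and the backwards coupon scan entirely: A's inner loop always breaks at j = i-1 with min(dp[i], dp[i-1]+price) = dp[i-1]+price, so dp[n] is the sum of the first n prices; B keeps one running total per case.
import Mathlib
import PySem

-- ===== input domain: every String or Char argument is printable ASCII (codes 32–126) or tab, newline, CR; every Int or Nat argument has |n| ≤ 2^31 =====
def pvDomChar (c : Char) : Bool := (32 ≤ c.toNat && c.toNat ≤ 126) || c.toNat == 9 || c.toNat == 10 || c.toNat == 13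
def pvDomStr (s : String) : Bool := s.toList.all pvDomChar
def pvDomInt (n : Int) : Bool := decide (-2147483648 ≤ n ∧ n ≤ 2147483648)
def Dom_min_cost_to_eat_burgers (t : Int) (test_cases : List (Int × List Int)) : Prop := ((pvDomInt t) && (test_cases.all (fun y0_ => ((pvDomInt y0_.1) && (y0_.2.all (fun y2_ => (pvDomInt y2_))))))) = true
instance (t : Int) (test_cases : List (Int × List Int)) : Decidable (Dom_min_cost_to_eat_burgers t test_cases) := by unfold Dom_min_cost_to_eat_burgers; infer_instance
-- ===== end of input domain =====

-- B drops A's dp/points arrays and backwards coupon scan (which never changes dp) and keeps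
-- one running total per case; equal return values on Pre_ (neither version mutates its arguments).

-- ===== PORT A =====
-- inner 'for j in range(i-1, -1, -1): if points[j] >= 100: …; break'
-- carries the current (dp[i], points[i]) pair and returns its final value at the break.
-- dp cells are Option Int: 'none' is the initial float('inf') (never read on Pre_-admitted inputs);
-- min(dp[i], inf) = dp[i] is the 'none' branch of the match.
def pvInnerA (dp : List (Option Int)) (points : List Int) (price : Int)
    (st : Int × Int) : List Int → Int × Int
  | [] => st
  | j :: rest =>
    if (PySem.List.pyGet? points j).getD 0 ≥ 100 then
      ((match (PySem.List.pyGet? dp j).getD none with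
        | some v => min st.1 (v + price)
        | none => st.1),
       (PySem.List.pyGet? points j).getD 0 + price - 100)
    else pvInnerA dp points price st rest

-- one iteration of 'for i in range(1, n+1)'
def pvStepA (prices : List Int) (st : List (Option Int) × List Int) (i : Int) :
    List (Option Int) × List Int :=
  let price := (PySem.List.pyGet? prices (i - 1)).getD 0
  let dp1 := PySem.List.pySetD st.1 i (some (((PySem.List.pyGet? st.1 (i - 1)).getD none).getD 0 + price))
  let pts1 := PySem.List.pySetD st.2 i ((PySem.List.pyGet? st.2 (i - 1)).getD 0 + price)
  if (PySem.List.pyGet? pts1 (i - 1)).getD 0 ≥ 100 then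
    let r := pvInnerA dp1 pts1 price
      (((PySem.List.pyGet? dp1 i).getD none).getD 0, (PySem.List.pyGet? pts1 i).getD 0)
      (PySem.List.pyRange (i - 1) (-1) (-1))
    (PySem.List.pySetD dp1 i (some r.1), PySem.List.pySetD pts1 i r.2)
  else (dp1, pts1)

-- one test case: build dp/points, run the i-loop, return dp[n]
def pvCaseA (case : Int × List Int) : Int :=
  let n := case.1
  let prices := case.2
  let dp0 : List (Option Int) := PySem.List.pySetD (List.replicate (n + 1).toNat none) 0 (some 0)
  let pts0 : List Int := List.replicate (n + 1).toNat 0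
  let st := (PySem.List.pyRange 1 (n + 1) 1).foldl (pvStepA prices) (dp0, pts0)
  ((PySem.List.pyGet? st.1 n).getD none).getD 0

def min_cost_to_eat_burgers (t : Int) (test_cases : List (Int × List Int)) : List Int :=
  test_cases.foldl (fun results case => results ++ [pvCaseA case]) []

-- ===== PORT B =====
-- 'total = 0; for i in range(1, n+1): total += prices[i-1]'
def pvCaseB (case : Int × List Int) : Int :=
  (PySem.List.pyRange 1 (case.1 + 1) 1).foldl
    (fun total i => total + (PySem.List.pyGet? case.2 (i - 1)).getD 0) 0

def min_cost_to_eat_burgers_alt (t : Int) (test_cases : List (Int × List Int)) : List Int :=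
  test_cases.foldl (fun results case => results ++ [pvCaseB case]) []

-- ===== PRECONDITION & SPEC =====
-- Pre_ excludes exactly the inputs where A raises: a case with n < 0 (dp[0] = 0 on an empty dp,
-- IndexError) or n > len(prices) (prices[i-1], IndexError). A is total on the rest.
def Pre_min_cost_to_eat_burgers (t : Int) (test_cases : List (Int × List Int)) : Prop :=
  ∀ c ∈ test_cases, 0 ≤ c.1 ∧ c.1 ≤ (c.2.length : Int)
instance (t : Int) (test_cases : List (Int × List Int)) : Decidable (Pre_min_cost_to_eat_burgers t test_cases) := by unfold Pre_min_cost_to_eat_burgers; infer_instance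

def pvWitness_min_cost_to_eat_burgers : Int × (List (Int × List Int)) :=
  (2, [(3, [50, 60, 70]), (2, [100, 5])])

def Spec_min_cost_to_eat_burgers (t : Int) (test_cases : List (Int × List Int)) (out : List Int) : Prop := out = min_cost_to_eat_burgers_alt t test_cases
instance (t : Int) (test_cases : List (Int × List Int)) (out : List Int) : Decidable (Spec_min_cost_to_eat_burgers t test_cases out) := by unfold Spec_min_cost_to_eat_burgers; infer_instance

-- ===== CLAIM (what is proved, stated in full; the proofs are below) =====
def Claim_equal_min_cost_to_eat_burgers : Prop := ∀ (t : Int) (test_cases : List (Int × List Int)), Dom_min_cost_to_eat_burgers t test_cases → Pre_min_cost_to_eat_burgers t test_cases → Spec_min_cost_to_eat_burgers t test_cases (min_cost_to_eat_burgers t test_cases)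


-- ===== LEMMAS AND PROOFS =====

-- prefix sum of the first k prices
def pvSum (prices : List Int) (k : Nat) : Int := (prices.take k).sum

lemma pvSum_succ (prices : List Int) (k : Nat) (hk : k < prices.length) :
    pvSum prices (k+1) = pvSum prices k + prices[k] := by
  unfold pvSum; rw [List.take_add_one, List.sum_append]
  simp [List.getElem?_eq_getElem hk]

-- regardless of the coupon branch, one step of A writes dp[k+1] := dp[k] + prices[k]
lemma pvStepA_fst (prices : List Int) (st : List (Option Int) × List Int) (k : Nat)
    (hlen : k + 1 < st.1.length) (hdpk : st.1[k]? = some (some (pvSum prices k)))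
    (hk : k < prices.length) :
    (pvStepA prices st ((k : Int) + 1)).1 = st.1.set (k + 1) (some (pvSum prices (k + 1))) := by
  have hi1 : ((k : Int) + 1) - 1 = (k : Int) := by ring
  have htn : ((k : Int) + 1) = ((k + 1 : Nat) : Int) := by push_cast; ring
  unfold pvStepA
  rw [hi1, htn]
  simp only [PySem.List.pySetD_natCast, PySem.List.pyGet?_natCast, hdpk,
    List.getElem?_eq_getElem hk, Option.getD_some]
  set s := pvSum prices k with hs
  set c := prices[k] with hc
  split_ifs with hg
  · -- coupon branch: the inner loop breaks at its first j = k with the same value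
    rw [PySem.List.pyRange_neg_one_cons (by omega : (-1:Int) < (k:Int))]
    simp only [pvInnerA, PySem.List.pyGet?_natCast]
    rw [if_pos (by simpa using hg)]
    have hne : (st.1.set (k+1) (some (s + c)))[k]? = some (some s) := by
      rw [List.getElem?_set_ne (by omega), hdpk]
    have hself : (st.1.set (k+1) (some (s + c)))[k+1]? = some (some (s + c)) :=
      List.getElem?_set_self (by omega)
    simp only [hne, hself, Option.getD_some, min_self, List.set_set]
    rw [pvSum_succ prices k hk]
  · rw [pvSum_succ prices k hk]

-- A's i-loop keeps dp[j] = sum of the first j prices for every processed j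
lemma pvFoldA (prices : List Int) (n : Nat) (hn : n ≤ prices.length) :
    ∀ k, k ≤ n →
      (((PySem.List.pyRange 1 ((k : Int) + 1) 1).foldl (pvStepA prices)
          (PySem.List.pySetD (List.replicate (n + 1) (none : Option Int)) 0 (some 0),
           List.replicate (n + 1) (0 : Int))).1.length = n + 1) ∧
      (∀ j, j ≤ k →
        ((PySem.List.pyRange 1 ((k : Int) + 1) 1).foldl (pvStepA prices)
          (PySem.List.pySetD (List.replicate (n + 1) (none : Option Int)) 0 (some 0),
           List.replicate (n + 1) (0 : Int))).1[j]? = some (some (pvSum prices j))) := by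
  intro k
  induction k with
  | zero =>
    intro _
    rw [show ((0:Nat):Int) + 1 = 1 by norm_num, PySem.List.pyRange_one_eq_nil (by omega)]
    rw [List.foldl_nil, PySem.List.pySetD_of_nonneg _ _ (by omega : (0:Int) ≤ 0)]
    constructor
    · simp
    · intro j hj
      rw [Nat.le_zero.mp hj]
      rw [show (0:Int).toNat = 0 from rfl, List.getElem?_set_self (by simp)]
      simp [pvSum]
  | succ m ih =>
    intro hm1
    have hIH := ih (by omega)
    have h1 : ((m+1 : Nat) : Int) + 1 = ((m : Int) + 1) + 1 := by push_cast; ring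
    rw [h1, PySem.List.pyRange_one_succ_right (by omega), List.foldl_append]
    simp only [List.foldl_cons, List.foldl_nil]
    rw [pvStepA_fst prices _ m (by omega) (hIH.2 m le_rfl) (by omega)]
    refine ⟨by simpa using hIH.1, fun j hj => ?_⟩
    rcases Nat.lt_or_ge j (m+1) with hlt | hge
    · rw [List.getElem?_set_ne (by omega)]
      exact hIH.2 j (by omega)
    · have : j = m + 1 := by omega
      subst this
      rw [List.getElem?_set_self (by omega)]

-- B's running total is the same prefix sum
lemma pvFoldB (prices : List Int) (k : Nat) (hk : k ≤ prices.length) :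
    (PySem.List.pyRange 1 ((k : Int) + 1) 1).foldl
      (fun total i => total + (PySem.List.pyGet? prices (i - 1)).getD 0) 0 = pvSum prices k := by
  induction k with
  | zero => simp [PySem.List.pyRange_one_eq_nil, pvSum]
  | succ m ih =>
    have h1 : ((m+1 : Nat) : Int) + 1 = ((m : Int) + 1) + 1 := by push_cast; ring
    have hm : m < prices.length := by omega
    rw [h1, PySem.List.pyRange_one_succ_right (by omega), List.foldl_append,
        ih (by omega)]
    simp [PySem.List.pyGet?, PySem.List.pyIdx?, pvSum_succ prices m hm, hm]

lemma pvCaseAB (c : Int × List Int) (h0 : 0 ≤ c.1) (h1 : c.1 ≤ (c.2.length : Int)) :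
    pvCaseA c = pvCaseB c := by
  obtain ⟨N, hN⟩ : ∃ N : Nat, c.1 = (N : Int) := ⟨c.1.toNat, by omega⟩
  have hNlen : N ≤ c.2.length := by omega
  have ht : ((N : Int) + 1).toNat = N + 1 := by omega
  simp only [pvCaseA, pvCaseB, hN, ht]
  have hA := pvFoldA c.2 N hNlen N le_rfl
  rw [PySem.List.pyGet?_natCast, hA.2 N le_rfl, Option.getD_some, Option.getD_some,
    pvFoldB c.2 N hNlen]

-- ===== VERDICT (by name: the statement is the Claim_ definition above) =====
theorem min_cost_to_eat_burgers_spec : Claim_equal_min_cost_to_eat_burgers := by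
  intro t tc _ hpre
  unfold Spec_min_cost_to_eat_burgers min_cost_to_eat_burgers min_cost_to_eat_burgers_alt
  exact PySem.List.foldl_congr_mem tc _ _ []
    (fun acc c hc => by rw [pvCaseAB c (hpre c hc).1 (hpre c hc).2])
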